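-- pv_equiv track=rewrite | github.com/dcompgriff/Local_Mincemeat_MapReduce | primes.py | mapfn
-- ===== SOURCE A (Python) =====
-- def mapfn(k, v):
--     '''
--     Tail recursive isPalindrome test.
--     '''
--     def isPalindrome(strTest):
--         if len(strTest) == 1 or len(strTest) == 0:
--             return True
--         else:
--             if strTest[0] == strTest[-1]:
--                 return isPalindrome(strTest[1:-1])
--             else:
--                 return False
--
--     '''
--     Determine if a number is prime, and yield it if true.
--     '''
--     #Yield an amount for each key.
--     for value in v:
--         if isPalindrome(value):
--             yield value, value
-- ===== SOURCE B (Python) =====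
-- def mapfn(k, v):
--     def is_pal(s):
--         i, j = 0, len(s) - 1
--         while i < j:
--             if s[i] != s[j]:
--                 return False
--             i += 1
--             j -= 1
--         return True
--     return [(value, value) for value in v if is_pal(value)]
-- ===== Notes on version B (the rewrite author's own statement) =====
-- stated objective: faster
-- what changed: Replaced the recursive slicing palindrome test (each step copies the string with strTest[1:-1], O(n^2) per string) by an in-place two-pointer index scan (O(n) per string, no copies), and the yield loop by a list comprehension.
import Mathlib
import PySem

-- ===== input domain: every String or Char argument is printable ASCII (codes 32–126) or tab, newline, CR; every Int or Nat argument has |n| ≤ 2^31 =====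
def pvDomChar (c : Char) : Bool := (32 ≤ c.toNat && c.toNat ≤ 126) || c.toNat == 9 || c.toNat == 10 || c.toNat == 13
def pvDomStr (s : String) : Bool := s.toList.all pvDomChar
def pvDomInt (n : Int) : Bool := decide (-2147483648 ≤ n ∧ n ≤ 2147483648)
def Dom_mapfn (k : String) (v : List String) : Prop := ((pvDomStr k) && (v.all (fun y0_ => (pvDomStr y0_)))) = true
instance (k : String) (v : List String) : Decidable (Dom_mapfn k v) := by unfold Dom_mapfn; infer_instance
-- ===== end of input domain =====

-- B replaces A's recursive-slicing palindrome test (which copies the string at every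
-- step) by a two-pointer index scan and a comprehension.

-- ===== PORT A =====
-- A's isPalindrome, on the string's code points (Python string indexing/slicing is exactly
-- PySem.List.pyGet?/slice on the code-point list, per the PySem.Chars bridge).
def isPalindromeA (l : List Char) : Bool :=
  if l.length = 1 ∨ l.length = 0 then true
  else
    if PySem.List.pyGet? l 0 = PySem.List.pyGet? l (-1) then
      isPalindromeA (PySem.List.slice l (some 1) (some (-1)))
    else false
termination_by l.length
decreasing_by
  rename_i hcond _hget
  simp only [PySem.List.length_slice, PySem.List.clampIdx]
  split_ifs <;> omega

-- the generator loop: yield (value, value) for each palindrome value, in order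
def mapfn (k : String) (v : List String) : List (String × String) :=
  v.foldl (fun acc value =>
    if isPalindromeA value.toList then acc ++ [(value, value)] else acc) []

-- ===== PORT B =====
-- B's two-pointer while loop: indices i, j walk inwards; every index used is in range
def twoPtr (cs : List Char) (i j : Nat) : Bool :=
  if i < j then
    if cs[i]? ≠ cs[j]? then false
    else twoPtr cs (i + 1) (j - 1)
  else true
termination_by j - i

def isPalB (s : String) : Bool := twoPtr s.toList 0 (s.toList.length - 1)

def mapfn_alt (k : String) (v : List String) : List (String × String) :=
  (v.filter isPalB).map (fun value => (value, value))

-- ===== PRECONDITION & SPEC =====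
def Spec_mapfn (k : String) (v : List String) (out : List (String × String)) : Prop := out = mapfn_alt k v
instance (k : String) (v : List String) (out : List (String × String)) : Decidable (Spec_mapfn k v out) := by unfold Spec_mapfn; infer_instance

-- ===== CLAIM (what is proved, stated in full; the proofs are below) =====
def Claim_equal_mapfn : Prop := ∀ (k : String) (v : List String), Dom_mapfn k v → Spec_mapfn k v (mapfn k v)

-- ===== LEMMAS AND PROOFS =====

-- peeling first and last element of a palindrome candidate
lemma pal_peel (a b : Char) (mid : List Char) :
    (a :: (mid ++ [b]) = (a :: (mid ++ [b])).reverse) ↔ (a = b ∧ mid = mid.reverse) := by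
  have hrev : (a :: (mid ++ [b])).reverse = b :: (mid.reverse ++ [a]) := by simp
  rw [hrev]
  constructor
  · intro h
    injection h with h1 h2
    subst h1
    exact ⟨rfl, List.append_inj_left' h2 rfl⟩
  · rintro ⟨rfl, h⟩
    rw [← h]

-- every list of length ≥ 2 splits as a :: mid ++ [b]
lemma split_two {l : List Char} (h : 2 ≤ l.length) :
    ∃ a mid b, l = a :: (mid ++ [b]) := by
  match l, h with
  | a :: rest, h =>
    have hr : rest ≠ [] := by rintro rfl; simp at h
    exact ⟨a, rest.dropLast, rest.getLast hr, by simp [List.dropLast_append_getLast hr]⟩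

lemma slice_one_neg_one (a b : Char) (mid : List Char) :
    PySem.List.slice (a :: (mid ++ [b])) (some 1) (some (-1)) = mid := by
  simp [PySem.List.slice, PySem.List.clampIdx]
  rw [if_neg (by omega)]
  simp

lemma pyGet?_last (a b : Char) (mid : List Char) :
    PySem.List.pyGet? (a :: (mid ++ [b])) (-1) = some b := by
  rw [show a :: (mid ++ [b]) = (a :: mid) ++ [b] by simp,
    PySem.List.pyGet?_neg_one_append_singleton]

-- A's test decides "the list equals its reverse"
lemma isPalindromeA_eq_reverse (l : List Char) :
    isPalindromeA l = decide (l = l.reverse) := by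
  generalize hn : l.length = n
  induction n using Nat.strong_induction_on generalizing l with
  | _ n ih =>
    rw [isPalindromeA]
    by_cases h : l.length = 1 ∨ l.length = 0
    · rw [if_pos h]
      rcases h with h | h
      · match l, h with
        | [c], _ => simp
      · match l, h with
        | [], _ => simp
    · rw [if_neg h]
      have h2 : 2 ≤ l.length := by omega
      obtain ⟨a, mid, b, rfl⟩ := split_two h2
      rw [PySem.List.pyGet?_zero_cons, pyGet?_last, slice_one_neg_one]
      have hlen : mid.length < n := by simp at hn; omega
      by_cases hab : a = b
      · subst hab
        rw [if_pos rfl, ih mid.length hlen mid rfl]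
        simp
      · rw [if_neg (by simpa using hab)]
        simp [hab]

-- one-step unfolding of the while loop (cited with explicit arguments)
lemma twoPtr_unfold (cs : List Char) (i j : Nat) :
    twoPtr cs i j =
      if i < j then
        (if cs[i]? ≠ cs[j]? then false else twoPtr cs (i + 1) (j - 1))
      else true := by
  rw [twoPtr]

-- shifting the two pointers past a common head element
lemma twoPtr_shift (a : Char) (xs : List Char) : ∀ (i j : Nat),
    twoPtr (a :: xs) (i + 1) (j + 1) = twoPtr xs i j := by
  intro i j
  generalize hf : j - i = f
  induction f using Nat.strong_induction_on generalizing i j with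
  | _ f ih =>
    rw [twoPtr_unfold (a :: xs) (i + 1) (j + 1), twoPtr_unfold xs i j]
    by_cases hij : i < j
    · rw [if_pos (by omega), if_pos hij]
      simp only [List.getElem?_cons_succ]
      by_cases hne : xs[i]? ≠ xs[j]?
      · rw [if_pos hne, if_pos hne]
      · rw [if_neg hne, if_neg hne,
          show j + 1 - 1 = (j - 1) + 1 by omega]
        exact ih ((j - 1) - (i + 1)) (by omega) (i + 1) (j - 1) rfl
    · rw [if_neg (by omega), if_neg hij]

-- an element appended past the right pointer is never inspected
lemma twoPtr_drop_last (xs : List Char) (b : Char) : ∀ (i j : Nat), j < xs.length →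
    twoPtr (xs ++ [b]) i j = twoPtr xs i j := by
  intro i j
  generalize hf : j - i = f
  induction f using Nat.strong_induction_on generalizing i j with
  | _ f ih =>
    intro hj
    rw [twoPtr_unfold (xs ++ [b]) i j, twoPtr_unfold xs i j]
    by_cases hij : i < j
    · rw [if_pos hij, if_pos hij,
        List.getElem?_append_left (by omega), List.getElem?_append_left hj]
      by_cases hne : xs[i]? ≠ xs[j]?
      · rw [if_pos hne, if_pos hne]
      · rw [if_neg hne, if_neg hne]
        exact ih ((j - 1) - (i + 1)) (by omega) (i + 1) (j - 1) rfl (by omega)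
    · rw [if_neg hij, if_neg hij]

-- B's test decides the same predicate
lemma twoPtr_eq_reverse (l : List Char) :
    twoPtr l 0 (l.length - 1) = decide (l = l.reverse) := by
  generalize hn : l.length = n
  induction n using Nat.strong_induction_on generalizing l with
  | _ n ih =>
    subst hn
    by_cases h2 : 2 ≤ l.length
    · obtain ⟨a, mid, b, rfl⟩ := split_two h2
      have hlen0 : (a :: (mid ++ [b])).length - 1 = mid.length + 1 := by simp
      rw [hlen0, twoPtr_unfold (a :: (mid ++ [b])) 0 (mid.length + 1), if_pos (by omega)]
      have hget0 : (a :: (mid ++ [b]))[0]? = some a := rfl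
      have hgetl : (a :: (mid ++ [b]))[mid.length + 1]? = some b := by simp
      rw [hget0, hgetl]
      by_cases hab : a = b
      · subst hab
        rw [if_neg (by simp)]
        have hrec : twoPtr (a :: (mid ++ [a])) (0 + 1) (mid.length + 1 - 1)
            = decide (mid = mid.reverse) := by
          rcases Nat.eq_zero_or_pos mid.length with hm | hm
          · match mid, hm with
            | [], _ => rw [twoPtr_unfold]; simp
          · rw [show mid.length + 1 - 1 = (mid.length - 1) + 1 by omega,
              twoPtr_shift, twoPtr_drop_last mid a 0 (mid.length - 1) (by omega)]
            exact ih mid.length (by simp) mid rfl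
        simpa [pal_peel] using hrec
      · rw [if_pos (by simpa using hab)]
        simp [hab]
    · rcases l with _ | ⟨c, _ | ⟨d, t⟩⟩
      · rw [twoPtr_unfold]; simp
      · rw [twoPtr_unfold]; simp
      · simp at h2

-- hence the two palindrome tests agree on every string
lemma isPal_agree (s : String) : isPalindromeA s.toList = isPalB s := by
  rw [isPalindromeA_eq_reverse, isPalB, twoPtr_eq_reverse]

-- and the two loop shapes produce the same list
lemma fold_eq_filter_map (v : List String) :
    v.foldl (fun acc value =>
      if isPalindromeA value.toList then acc ++ [(value, value)] else acc) []
      = (v.filter isPalB).map (fun value => (value, value)) := by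
  have : ∀ value : String, isPalindromeA value.toList = isPalB value := isPal_agree
  simp only [this]
  rw [PySem.List.foldl_append_if]
  simp

-- ===== VERDICT (by name: the statement is the Claim_ definition above) =====
theorem mapfn_spec : Claim_equal_mapfn := by
  intro k v _
  unfold Spec_mapfn mapfn mapfn_alt
  exact fold_eq_filter_map v
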